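-- pv_equiv track=rewrite | github.com/xu0808/ai_jiaxu | work/pyspark/feature/2_feature.py | genre_sort
-- ===== SOURCE A (Python) =====
-- def genre_sort(genres_list):
--     """
--     :param
--     ["Action|Adventure|Sci-Fi|Thriller", "Crime|Horror|Thriller"]
--      ==>
--     (('Thriller',2),('Action',1),('Sci-Fi',1),('Horror', 1), ('Adventure',1),('Crime',1))
--     :return:
--     ['Thriller','Action','Sci-Fi','Horror','Adventure','Crime']
--     """
--     genres_dict = {}
--     for genres in genres_list:
--         # null 直接跳过
--         if not genres or len(genres.strip()) == 0:
--             continue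
--         for g in genres.split('|'):
--             if g not in genres_dict:
--                 genres_dict[g] = 0
--             genres_dict[g] += 1
--     # 按照value排序
--     sorted_genres = sorted(genres_dict.items(), key=lambda x: x[1], reverse=True)
--     return [x[0] for x in sorted_genres]
-- ===== SOURCE B (Python) =====
-- def genre_sort(genres_list):
--     # Flatten to one token stream, count with a counter, then bucket-sort by
--     # frequency (concatenate buckets from the highest count down to 1), which
--     # reproduces the stable frequency-descending order with first-appearance ties.
--     tokens = [g for s in genres_list if s and s.strip() for g in s.split('|')]
--     counts = {}
--     for g in tokens:
--         counts[g] = counts.get(g, 0) + 1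
--     if not counts:
--         return []
--     buckets = {}
--     for g, c in counts.items():
--         buckets.setdefault(c, []).append(g)
--     m = max(buckets)
--     return [g for c in range(m, 0, -1) for g in buckets.get(c, [])]
-- ===== Notes on version B (the rewrite author's own statement) =====
-- stated objective: alternative
-- what changed: B flattens the input to one token stream, counts it with a counter, and replaces A's comparison sort of the count dict by a bucket pass: genres are appended to per-count buckets in insertion order and the buckets are concatenated from the maximum count down to 1, reproducing the stable frequency-descending order with first-appearance tie-breaking.
import Mathlib
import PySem

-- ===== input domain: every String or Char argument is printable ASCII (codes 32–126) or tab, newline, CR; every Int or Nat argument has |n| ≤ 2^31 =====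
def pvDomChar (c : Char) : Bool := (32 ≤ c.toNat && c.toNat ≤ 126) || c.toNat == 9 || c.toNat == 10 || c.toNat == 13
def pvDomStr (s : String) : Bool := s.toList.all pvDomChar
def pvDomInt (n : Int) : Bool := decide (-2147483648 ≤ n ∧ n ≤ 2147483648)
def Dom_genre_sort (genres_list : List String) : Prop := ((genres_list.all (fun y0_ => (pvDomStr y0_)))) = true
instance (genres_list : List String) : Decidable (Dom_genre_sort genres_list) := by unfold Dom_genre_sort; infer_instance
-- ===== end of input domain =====

-- B replaces A's comparison sort of the count dict by a counting/bucket pass over a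
-- flattened token stream (same order, same ties); objective: alternative algorithm.

-- s.split('|'): the separator is the nonempty literal "|", so split? is always `some`
-- and the `.getD []` default is never taken (exact).
def pvSplitBar (s : String) : List String := (PySem.Str.split? s "|").getD []

-- ===== PORT A =====
def genre_sort (genres_list : List String) : List String :=
  let genres_dict := genres_list.foldl (fun genres_dict genres =>
    if genres = "" ∨ PySem.Str.len (PySem.Str.strip genres) = 0 then genres_dict
    else (pvSplitBar genres).foldl (fun d g =>
      let d := if d.contains g = false then d.insert g 0 else d
      -- 'genres_dict[g] += 1': g is present here (just inserted if missing), so getD is exact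
      d.insert g (d.getD g 0 + 1)) genres_dict) (PySem.Dict.empty : PySem.Dict String Int)
  let sorted_genres := PySem.List.sorted genres_dict.items (fun x => x.2) true
  sorted_genres.map (fun x => x.1)

-- ===== PORT B =====
def genre_sort_alt (genres_list : List String) : List String :=
  let tokens := genres_list.flatMap (fun s =>
    if s ≠ "" ∧ PySem.Str.len (PySem.Str.strip s) ≠ 0 then pvSplitBar s else [])
  let counts := tokens.foldl (fun counts g => counts.modify g 0 (fun x => x + 1))
    (PySem.Dict.empty : PySem.Dict String Int)
  if counts.size = 0 then []
  else
    let buckets := counts.items.foldl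
      (fun b p => b.modify p.2 [] (fun l => l ++ [p.1])) (PySem.Dict.empty : PySem.Dict Int (List String))
    match PySem.List.max? buckets.keys (fun x => x) with
    | none => []   -- unreachable: counts.size ≠ 0, so buckets has a key (Python's max would raise only on empty)
    | some m => (PySem.List.pyRange m 0 (-1)).flatMap (fun c => buckets.getD c [])

-- ===== PRECONDITION & SPEC =====
def Spec_genre_sort (genres_list : List String) (out : List String) : Prop := out = genre_sort_alt genres_list
instance (genres_list : List String) (out : List String) : Decidable (Spec_genre_sort genres_list out) := by unfold Spec_genre_sort; infer_instance

-- ===== CLAIM (what is proved, stated in full; the proofs are below) =====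
def Claim_equal_genre_sort : Prop := ∀ (genres_list : List String), Dom_genre_sort genres_list → Spec_genre_sort genres_list (genre_sort genres_list)

-- ===== LEMMAS AND PROOFS =====

-- A's inner-loop body ('if missing: insert 0; then += 1') is the counter insert step.
lemma stepA_eq_counter_step (d : PySem.Dict String Int) (g : String) :
    (if d.contains g = false then d.insert g 0 else d).insert g
      ((if d.contains g = false then d.insert g 0 else d).getD g 0 + 1)
    = d.insert g (d.getD g 0 + 1) := by
  by_cases h : d.contains g = false
  · simp only [h, if_pos]
    rw [PySem.Dict.getD_insert_self, PySem.Dict.insert_insert_self,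
        PySem.Dict.getD_of_not_contains d 0 h]
  · simp [h]

lemma foldA_eq (l : List String) (d : PySem.Dict String Int) :
    l.foldl (fun d g =>
      (if d.contains g = false then d.insert g 0 else d).insert g
        ((if d.contains g = false then d.insert g 0 else d).getD g 0 + 1)) d
    = l.foldl (fun d g => d.insert g (d.getD g 0 + 1)) d := by
  simp only [stepA_eq_counter_step]

-- insertBy slides past a prefix it does not go before
lemma insertBy_cons_eq {α : Type} (before : α → α → Bool) (x y : α) (ys : List α) :
    PySem.List.insertBy before x (y :: ys)
      = if before x y then x :: y :: ys else y :: PySem.List.insertBy before x ys := rfl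

lemma insertBy_append_not {α : Type} (before : α → α → Bool) (x : α) (l1 l2 : List α)
    (h : ∀ y ∈ l1, before x y = false) :
    PySem.List.insertBy before x (l1 ++ l2) = l1 ++ PySem.List.insertBy before x l2 := by
  induction l1 with
  | nil => rfl
  | cons y t ih =>
    rw [List.cons_append, insertBy_cons_eq, if_neg (by simp [h y (by simp)]),
        ih (fun z hz => h z (by simp [hz]))]
    simp

lemma insertBy_all {α : Type} (before : α → α → Bool) (x : α) (l : List α)
    (h : ∀ y ∈ l, before x y = true) :
    PySem.List.insertBy before x l = x :: l := by
  cases l with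
  | nil => rfl
  | cons y t => rw [insertBy_cons_eq, if_pos (h y (by simp))]

-- inserting p into the bucket decomposition puts it at the end of its own bucket
lemma insertBy_buckets {α : Type} (p : α × Int) (cs : List Int) (ps : List (α × Int))
    (hcs : cs.Pairwise (· > ·)) (hp : p.2 ∈ cs) :
    PySem.List.insertBy (fun a b => decide (b.2 < a.2)) p
        (cs.flatMap (fun c => ps.filter (fun q => q.2 == c)))
    = cs.flatMap (fun c => (ps ++ [p]).filter (fun q => q.2 == c)) := by
  induction cs with
  | nil => cases hp
  | cons c cs' ih =>
    have hgt : ∀ c' ∈ cs', c > c' := fun c' hc' => List.rel_of_pairwise_cons hcs hc'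
    simp only [List.flatMap_cons, List.filter_append]
    by_cases hpc : p.2 = c
    · have hrest : ∀ c' ∈ cs',
          (ps.filter (fun q => q.2 == c') ++ [p].filter (fun q => q.2 == c'))
            = ps.filter (fun q => q.2 == c') := by
        intro c' hc'
        have : (p.2 == c') = false := by
          simp only [beq_eq_false_iff_ne]
          exact fun h => absurd hpc (by rw [h]; exact ne_of_lt (hgt c' hc'))
        simp [List.filter, this]
      rw [List.flatMap_congr hrest]
      have h1 : ∀ y ∈ ps.filter (fun q => q.2 == c),
          (fun a b => decide (b.2 < a.2)) p y = false := by
        intro y hy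
        have := List.of_mem_filter hy
        simp only [beq_iff_eq] at this
        simp [this, hpc]
      have h2 : ∀ y ∈ cs'.flatMap (fun c => ps.filter (fun q => q.2 == c)),
          (fun a b => decide (b.2 < a.2)) p y = true := by
        intro y hy
        obtain ⟨c', hc', hyf⟩ := List.mem_flatMap.1 hy
        have := List.of_mem_filter hyf
        simp only [beq_iff_eq] at this
        simp [this, hpc, hgt c' hc']
      rw [insertBy_append_not _ _ _ _ h1, insertBy_all _ _ _ h2]
      have : (p.2 == c) = true := by simp [hpc]
      simp [List.filter, this]
    · have hp' : p.2 ∈ cs' := by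
        cases hp with
        | head => exact absurd rfl hpc
        | tail _ h => exact h
      have h1 : ∀ y ∈ ps.filter (fun q => q.2 == c),
          (fun a b => decide (b.2 < a.2)) p y = false := by
        intro y hy
        have := List.of_mem_filter hy
        simp only [beq_iff_eq] at this
        have : ¬ (y.2 < p.2) := by rw [this]; exact not_lt.2 (le_of_lt (hgt _ hp'))
        simpa using this
      have hc0 : (p.2 == c) = false := by simp [hpc]
      rw [insertBy_append_not _ _ _ _ h1,
          ih (List.Pairwise.sublist (List.sublist_cons_self c cs') hcs) hp']
      simp [List.filter, hc0]

-- stable reverse sort by the (bounded) count key IS the bucket concatenation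
lemma sorted_eq_buckets {α : Type} (ps : List (α × Int)) (cs : List Int)
    (hcs : cs.Pairwise (· > ·)) (hmem : ∀ p ∈ ps, p.2 ∈ cs) :
    PySem.List.sorted ps (fun x => x.2) true
      = cs.flatMap (fun c => ps.filter (fun q => q.2 == c)) := by
  rw [PySem.List.sorted_rev_eq_foldl_insertBy]
  induction ps using List.reverseRecOn with
  | nil => simp
  | append_singleton t p ih =>
    rw [List.foldl_append, List.foldl_cons, List.foldl_nil,
        ih (fun q hq => hmem q (by simp [hq])),
        insertBy_buckets p cs t hcs (hmem p (by simp))]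

lemma pyRange_down_pairwise (m : Int) : (PySem.List.pyRange m 0 (-1)).Pairwise (· > ·) := by
  rw [PySem.List.pyRange_neg_one]
  exact List.Pairwise.map _ (fun h => by omega) List.pairwise_lt_range

-- ===== VERDICT (by name: the statement is the Claim_ definition above) =====
theorem genre_sort_spec : Claim_equal_genre_sort := by
  intro gs _
  unfold Spec_genre_sort genre_sort genre_sort_alt
  dsimp only
  -- both count dicts are Counter(tokens)
  set tok : String → List String := fun s =>
    if s ≠ "" ∧ PySem.Str.len (PySem.Str.strip s) ≠ 0 then pvSplitBar s else [] with htok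
  have hA : gs.foldl (fun genres_dict genres =>
      if genres = "" ∨ PySem.Str.len (PySem.Str.strip genres) = 0 then genres_dict
      else (pvSplitBar genres).foldl (fun d g =>
        (if d.contains g = false then d.insert g 0 else d).insert g
          ((if d.contains g = false then d.insert g 0 else d).getD g 0 + 1)) genres_dict)
      (PySem.Dict.empty : PySem.Dict String Int)
      = PySem.Dict.counter (gs.flatMap tok) := by
    rw [← PySem.Dict.foldl_insert_getD_add_one_eq_counter, List.foldl_flatMap]
    refine PySem.List.foldl_congr_mem _ _ _ _ (fun d s _ => ?_)
    by_cases h : s = "" ∨ PySem.Str.len (PySem.Str.strip s) = 0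
    · have ht : tok s = [] := by rw [htok]; exact if_neg (by tauto)
      rw [ht, if_pos h]; rfl
    · have ht : tok s = pvSplitBar s := by rw [htok]; exact if_pos (by tauto)
      rw [ht, if_neg h]; exact foldA_eq _ _
  refine Eq.trans (congrArg (fun d : PySem.Dict String Int =>
    List.map (fun x => x.1) (PySem.List.sorted d.items (fun x => x.2) true)) hA) ?_
  rw [← PySem.Dict.counter_eq_foldl]
  set tokens := gs.flatMap tok with htokens
  -- empty case
  by_cases hsz : (PySem.Dict.counter tokens).size = 0
  · have hit : (PySem.Dict.counter tokens).items = [] :=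
      List.length_eq_zero_iff.1 hsz
    simp [hsz, hit, PySem.List.sorted]
  · simp only [hsz, if_false]
    set ps := (PySem.Dict.counter tokens).items with hps
    -- the bucket dict's lookups and keys
    have hbfold : ps.foldl (fun b p => b.modify p.2 [] (fun l => l ++ [p.1])) PySem.Dict.empty
        = (ps.map Prod.swap).foldl (fun b q => b.modify q.1 [] (fun l => l ++ [q.2])) PySem.Dict.empty := by
      rw [List.foldl_map]; rfl
    have hkeys : ∀ c, c ∈ (ps.foldl (fun b p => b.modify p.2 [] (fun l => l ++ [p.1]))
        PySem.Dict.empty).keys ↔ c ∈ ps.map (fun p => p.2) := by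
      intro c
      rw [hbfold, PySem.Dict.keys_foldl_modify_key (ps.map Prod.swap) (fun q => q.1) []
            (fun b q l => l ++ [q.2])]
      rw [PySem.Set.mem_update]
      simp [PySem.Dict.keys_empty, PySem.Set, List.map_map, Function.comp, Prod.swap]
    have hgetD : ∀ c, (ps.foldl (fun b p => b.modify p.2 [] (fun l => l ++ [p.1]))
        PySem.Dict.empty).getD c [] = (ps.filter (fun q => q.2 == c)).map (fun q => q.1) := by
      intro c
      rw [hbfold, PySem.Dict.getD_foldl_modify_append]
      simp only [PySem.Dict.getD_empty, List.nil_append, List.filter_map, List.map_map]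
      simp [Function.comp_def]
    -- keys are nonempty, so max? returns some m
    have hne : ps ≠ [] := fun h => hsz (by simp [PySem.Dict.size, hps] at h ⊢; exact h)
    obtain ⟨p0, hp0⟩ := List.exists_mem_of_ne_nil ps hne
    cases hmax : PySem.List.max? (ps.foldl (fun b p => b.modify p.2 [] (fun l => l ++ [p.1]))
        PySem.Dict.empty).keys (fun x => x) with
    | none =>
      rw [PySem.List.max?_eq_none_iff] at hmax
      have hmem := (hkeys p0.2).2 (List.mem_map_of_mem hp0)
      rw [hmax] at hmem
      cases hmem
    | some m =>
      -- every count lies in (0, m]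
      have hbound : ∀ p ∈ ps, 0 < p.2 ∧ p.2 ≤ m := by
        intro p hp
        constructor
        · rw [hps, PySem.Dict.items_counter] at hp
          obtain ⟨k, hk, hkp⟩ := List.mem_map.1 hp
          rw [← hkp]
          dsimp only
          exact_mod_cast List.count_pos_iff.2 ((PySem.Set.mem_ofList tokens k).1 hk)
        · have : p.2 ∈ _ := (hkeys p.2).2 (List.mem_map_of_mem hp)
          exact PySem.List.max?_isMax hmax p.2 this
      have hsorted := sorted_eq_buckets ps (PySem.List.pyRange m 0 (-1))
        (pyRange_down_pairwise m)
        (fun p hp => PySem.List.mem_pyRange_neg_one.2 ⟨(hbound p hp).1, (hbound p hp).2⟩)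
      rw [hsorted, List.map_flatMap]
      exact List.flatMap_congr (fun c _ => by rw [hgetD c])
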